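-- pv_equiv track=rewrite | github.com/Kit-Basher/ai-assistant | agent/friction/options.py | _choose_options
-- ===== SOURCE A (Python) =====
-- _MAX_OPTIONS = 3
--
-- def _choose_options(
--     imperative_supported: tuple[tuple[str, str], ...],
--     structured_supported: tuple[str, ...],
-- ) -> list[str]:
--     options: list[str] = []
--     seen_text: set[str] = set()
--     seen_verb: set[str] = set()
--
--     for verb, option in imperative_supported:
--         key = option.lower()
--         if key in seen_text:
--             continue
--         if verb in seen_verb:
--             continue
--         seen_text.add(key)
--         seen_verb.add(verb)
--         options.append(option)
--         if len(options) >= _MAX_OPTIONS: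
--             return options
--
--     for option in structured_supported:
--         key = option.lower()
--         if key in seen_text:
--             continue
--         seen_text.add(key)
--         options.append(option)
--         if len(options) >= _MAX_OPTIONS:
--             return options
--
--     for _, option in imperative_supported:
--         key = option.lower()
--         if key in seen_text:
--             continue
--         seen_text.add(key)
--         options.append(option)
--         if len(options) >= _MAX_OPTIONS:
--             return options
--
--     return options
-- ===== SOURCE B (Python) =====
-- _MAX_OPTIONS = 3
--
-- def _choose_options(imperative_supported, structured_supported):
--     # Stateless filter-recursion: no seen-sets, no shared mutable state.
--     def verb_filtered(pairs):
--         # keep the head pair's option, purge its verb and lowercased key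
--         # from the tail, recurse
--         if not pairs:
--             return []
--         (verb, option), rest = pairs[0], pairs[1:]
--         key = option.lower()
--         return [option] + verb_filtered(
--             [(v, o) for v, o in rest if v != verb and o.lower() != key])
--
--     def first_distinct(items, budget):
--         # counted recursion: take the head, purge its key from the tail
--         if budget == 0 or not items:
--             return []
--         head, rest = items[0], items[1:]
--         key = head.lower()
--         return [head] + first_distinct(
--             [x for x in rest if x.lower() != key], budget - 1)
--
--     candidates = (verb_filtered(list(imperative_supported))
--                   + list(structured_supported)
--                   + [o for _, o in imperative_supported])
--     return first_distinct(candidates, _MAX_OPTIONS)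
-- ===== Notes on version B (the rewrite author's own statement) =====
-- stated objective: alternative
-- what changed: Replaces A's three capped loops over shared mutable seen-text/seen-verb sets by stateless filter-recursion: each accepted element purges its verb/lowercased key from the remaining tail, and a budget-counted recursion takes the first three distinct candidates; no seen-sets exist at all.
import Mathlib
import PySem

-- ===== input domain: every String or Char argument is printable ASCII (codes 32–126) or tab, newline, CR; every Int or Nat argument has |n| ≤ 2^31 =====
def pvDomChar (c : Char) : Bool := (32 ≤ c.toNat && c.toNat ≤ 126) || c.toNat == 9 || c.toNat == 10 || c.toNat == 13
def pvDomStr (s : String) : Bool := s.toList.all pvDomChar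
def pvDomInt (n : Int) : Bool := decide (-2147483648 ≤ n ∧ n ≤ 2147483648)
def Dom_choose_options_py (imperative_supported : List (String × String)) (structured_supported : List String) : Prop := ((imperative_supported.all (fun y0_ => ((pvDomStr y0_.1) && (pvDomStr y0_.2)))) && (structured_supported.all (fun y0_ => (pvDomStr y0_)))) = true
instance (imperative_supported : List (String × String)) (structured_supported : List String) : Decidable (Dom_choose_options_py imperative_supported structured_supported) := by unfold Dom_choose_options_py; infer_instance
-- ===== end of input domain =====

-- B replaces A's three capped loops over shared mutable seen-sets by stateless filter-recursion
-- (each accepted element purges its verb/key from the tail; a counted recursion takes 3) — alternative decomposition, same result.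
-- ===== PORT A =====
-- loop 1 of A: dedup by lowercased key AND verb, early return (flag=true) at 3 options
def pvA_loop1 : List (String × String) → List String → PySem.Set String → PySem.Set String →
    (List String × PySem.Set String × Bool)
  | [], opts, st, _ => (opts, st, false)
  | (verb, option) :: rest, opts, st, sv =>
    let key := PySem.Str.lower option
    if PySem.Set.contains st key then pvA_loop1 rest opts st sv
    else if PySem.Set.contains sv verb then pvA_loop1 rest opts st sv
    else
      let st' := PySem.Set.add st key
      let sv' := PySem.Set.add sv verb
      let opts' := opts ++ [option]
      if 3 ≤ opts'.length then (opts', st', true)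
      else pvA_loop1 rest opts' st' sv'

-- loop 2 of A (also the shape of loop 3): dedup by lowercased key, early return at 3
def pvA_loop2 : List String → List String → PySem.Set String → (List String × PySem.Set String × Bool)
  | [], opts, st => (opts, st, false)
  | option :: rest, opts, st =>
    let key := PySem.Str.lower option
    if PySem.Set.contains st key then pvA_loop2 rest opts st
    else
      let st' := PySem.Set.add st key
      let opts' := opts ++ [option]
      if 3 ≤ opts'.length then (opts', st', true)
      else pvA_loop2 rest opts' st'

-- loop 3 of A: 'for _, option in imperative_supported' with the same body as loop 2
def pvA_loop3 : List (String × String) → List String → PySem.Set String → (List String × PySem.Set String × Bool)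
  | [], opts, st => (opts, st, false)
  | (_, option) :: rest, opts, st =>
    let key := PySem.Str.lower option
    if PySem.Set.contains st key then pvA_loop3 rest opts st
    else
      let st' := PySem.Set.add st key
      let opts' := opts ++ [option]
      if 3 ≤ opts'.length then (opts', st', true)
      else pvA_loop3 rest opts' st'

def choose_options_py (imperative_supported : List (String × String)) (structured_supported : List String) : List String :=
  let r1 := pvA_loop1 imperative_supported [] PySem.Set.empty PySem.Set.empty
  if r1.2.2 then r1.1
  else
    let r2 := pvA_loop2 structured_supported r1.1 r1.2.1
    if r2.2.2 then r2.1
    else (pvA_loop3 imperative_supported r2.1 r2.2.1).1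

-- ===== PORT B =====
-- verb_filtered: keep the head pair's option, purge its verb and lowercased key from the tail, recurse
def pvB_verbFiltered : List (String × String) → List String
  | [] => []
  | (verb, option) :: rest =>
    let key := PySem.Str.lower option
    option :: pvB_verbFiltered
      (rest.filter (fun p => p.1 != verb && PySem.Str.lower p.2 != key))
termination_by l => l.length
decreasing_by
  simp only [List.length_unattach]
  exact Nat.lt_succ_of_le (le_trans (List.length_filter_le _ _) (by simp))

-- first_distinct: counted recursion — take the head, purge its lowercased key from the tail
def pvB_firstDistinct : List String → Nat → List String
  | _, 0 => []
  | [], _ => []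
  | head :: rest, n + 1 =>
    let key := PySem.Str.lower head
    head :: pvB_firstDistinct (rest.filter (fun x => PySem.Str.lower x != key)) n

def choose_options_py_alt (imperative_supported : List (String × String)) (structured_supported : List String) : List String :=
  let candidates := pvB_verbFiltered imperative_supported ++ structured_supported ++
    imperative_supported.map Prod.snd
  pvB_firstDistinct candidates 3

-- ===== PRECONDITION & SPEC =====
def Spec_choose_options_py (imperative_supported : List (String × String)) (structured_supported : List String) (out : List String) : Prop := out = choose_options_py_alt imperative_supported structured_supported
instance (imperative_supported : List (String × String)) (structured_supported : List String) (out : List String) : Decidable (Spec_choose_options_py imperative_supported structured_supported out) := by unfold Spec_choose_options_py; infer_instance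

-- ===== CLAIM (what is proved, stated in full; the proofs are below) =====
def Claim_equal_choose_options_py : Prop := ∀ (imperative_supported : List (String × String)) (structured_supported : List String), Dom_choose_options_py imperative_supported structured_supported → Spec_choose_options_py imperative_supported structured_supported (choose_options_py imperative_supported structured_supported)

-- ===== LEMMAS AND PROOFS =====
-- proof-side seen-set formulations bridging A's loops and B's filter-recursions
def pvS_phase1 : List (String × String) → PySem.Set String → PySem.Set String → List String
  | [], _, _ => []
  | (verb, option) :: rest, sk, sv =>
    let key := PySem.Str.lower option
    if PySem.Set.contains sk key || PySem.Set.contains sv verb then pvS_phase1 rest sk sv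
    else option :: pvS_phase1 rest (PySem.Set.add sk key) (PySem.Set.add sv verb)

def pvS_dedup : List String → PySem.Set String → List String
  | [], _ => []
  | option :: rest, seen =>
    let key := PySem.Str.lower option
    if PySem.Set.contains seen key then pvS_dedup rest seen
    else option :: pvS_dedup rest (PySem.Set.add seen key)

-- unbounded filter-dedup (pvB_firstDistinct without the budget)
def pvF_dedup : List String → List String
  | [] => []
  | head :: rest =>
    head :: pvF_dedup (rest.filter (fun x => PySem.Str.lower x != PySem.Str.lower head))
termination_by l => l.length
decreasing_by
  simp only [List.length_unattach]
  exact Nat.lt_succ_of_le (le_trans (List.length_filter_le _ _) (by simp))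

-- seen-set after keeping a list of options: add each lowercased key in order
def pvAddKeys (st : PySem.Set String) (l : List String) : PySem.Set String :=
  l.foldl (fun s o => PySem.Set.add s (PySem.Str.lower o)) st

theorem pvAddKeys_cons (st : PySem.Set String) (o : String) (l : List String) :
    pvAddKeys st (o :: l) = pvAddKeys (PySem.Set.add st (PySem.Str.lower o)) l := rfl

-- loop 1 characterised by pvS_phase1
theorem pvA_loop1_eq (xs : List (String × String)) (opts : List String)
    (st sv : PySem.Set String) (h : opts.length < 3) :
    pvA_loop1 xs opts st sv =
      (let p := pvS_phase1 xs st sv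
       let n := 3 - opts.length
       if n ≤ p.length then (opts ++ p.take n, pvAddKeys st (p.take n), true)
       else (opts ++ p, pvAddKeys st p, false)) := by
  induction xs generalizing opts st sv with
  | nil => simp [pvA_loop1, pvS_phase1, pvAddKeys]; omega
  | cons hd tl ih =>
    obtain ⟨verb, option⟩ := hd
    by_cases h1 : PySem.Str.lower option ∈ st
    · simp [pvA_loop1, pvS_phase1, h1, ih _ _ _ h]
    · by_cases h2 : verb ∈ sv
      · simp [pvA_loop1, pvS_phase1, h1, h2, ih _ _ _ h]
      · by_cases h3 : opts.length = 2
        · simp [pvA_loop1, pvS_phase1, h1, h2, h3, pvAddKeys]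
        · have h' : (opts ++ [option]).length < 3 := by simp; omega
          simp only [pvA_loop1, pvS_phase1]
          rw [if_neg (show ¬(PySem.Set.contains st (PySem.Str.lower option) = true) by simpa using h1),
            if_neg (show ¬(PySem.Set.contains sv verb = true) by simpa using h2),
            if_neg (show ¬(3 ≤ (opts ++ [option]).length) by simp; omega),
            ih _ _ _ h',
            if_neg (show ¬((PySem.Set.contains st (PySem.Str.lower option) || PySem.Set.contains sv verb) = true) by simp [h1, h2])]
          simp only [List.length_append, List.length_cons, List.length_nil]
          have hn : 3 - opts.length = (3 - (opts.length + 1)) + 1 := by omega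
          have hiff : (3 - (opts.length + (0 + 1)) ≤
              (pvS_phase1 tl (PySem.Set.add st (PySem.Str.lower option)) (PySem.Set.add sv verb)).length) ↔
              (3 - opts.length ≤
              (pvS_phase1 tl (PySem.Set.add st (PySem.Str.lower option)) (PySem.Set.add sv verb)).length + 1) := by
            omega
          split_ifs with hc1 hc2 hc2
          · simp only [hn, List.take_succ_cons, pvAddKeys_cons, List.append_assoc,
              List.singleton_append]
          · exact absurd (hiff.mp hc1) hc2
          · exact absurd (hiff.mpr hc2) hc1
          · simp [pvAddKeys_cons]

-- loop 2 characterised by pvS_dedup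
theorem pvA_loop2_eq (xs : List String) (opts : List String)
    (st : PySem.Set String) (h : opts.length < 3) :
    pvA_loop2 xs opts st =
      (let p := pvS_dedup xs st
       let n := 3 - opts.length
       if n ≤ p.length then (opts ++ p.take n, pvAddKeys st (p.take n), true)
       else (opts ++ p, pvAddKeys st p, false)) := by
  induction xs generalizing opts st with
  | nil => simp [pvA_loop2, pvS_dedup, pvAddKeys]; omega
  | cons hd tl ih =>
    by_cases h1 : PySem.Str.lower hd ∈ st
    · simp [pvA_loop2, pvS_dedup, h1, ih _ _ h]
    · by_cases h3 : opts.length = 2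
      · simp [pvA_loop2, pvS_dedup, h1, h3, pvAddKeys]
      · have h' : (opts ++ [hd]).length < 3 := by simp; omega
        simp only [pvA_loop2, pvS_dedup]
        rw [if_neg (show ¬(PySem.Set.contains st (PySem.Str.lower hd) = true) by simpa using h1),
          if_neg (show ¬(3 ≤ (opts ++ [hd]).length) by simp; omega),
          ih _ _ h',
          if_neg (show ¬(PySem.Set.contains st (PySem.Str.lower hd) = true) by simpa using h1)]
        simp only [List.length_append, List.length_cons, List.length_nil]
        have hn : 3 - opts.length = (3 - (opts.length + 1)) + 1 := by omega
        have hiff : (3 - (opts.length + (0 + 1)) ≤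
            (pvS_dedup tl (PySem.Set.add st (PySem.Str.lower hd))).length) ↔
            (3 - opts.length ≤ (pvS_dedup tl (PySem.Set.add st (PySem.Str.lower hd))).length + 1) := by
          omega
        split_ifs with hc1 hc2 hc2
        · simp only [hn, List.take_succ_cons, pvAddKeys_cons, List.append_assoc,
            List.singleton_append]
        · exact absurd (hiff.mp hc1) hc2
        · exact absurd (hiff.mpr hc2) hc1
        · simp [pvAddKeys_cons]

-- loop 3 is loop 2 on the second components
theorem pvA_loop3_eq (xs : List (String × String)) (opts : List String) (st : PySem.Set String) :
    pvA_loop3 xs opts st = pvA_loop2 (xs.map Prod.snd) opts st := by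
  induction xs generalizing opts st with
  | nil => rfl
  | cons hd tl ih => obtain ⟨v, o⟩ := hd; simp only [pvA_loop3, List.map_cons, pvA_loop2, ih]

-- deduping a concatenation splits
theorem pvS_dedup_append (xs ys : List String) (st : PySem.Set String) :
    pvS_dedup (xs ++ ys) st = pvS_dedup xs st ++ pvS_dedup ys (pvAddKeys st (pvS_dedup xs st)) := by
  induction xs generalizing st with
  | nil => rfl
  | cons hd tl ih =>
    by_cases h1 : PySem.Str.lower hd ∈ st
    · simp [pvS_dedup, h1, ih]
    · simp [pvS_dedup, h1, ih, pvAddKeys_cons]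

-- phase-1 output is already key-deduplicated w.r.t. its starting seen set
theorem pvS_dedup_phase1 (xs : List (String × String)) (sk sv : PySem.Set String) :
    pvS_dedup (pvS_phase1 xs sk sv) sk = pvS_phase1 xs sk sv := by
  induction xs generalizing sk sv with
  | nil => rfl
  | cons hd tl ih =>
    obtain ⟨v, o⟩ := hd
    by_cases h1 : PySem.Str.lower o ∈ sk
    · simp [pvS_phase1, h1, ih]
    · by_cases h2 : v ∈ sv
      · simp [pvS_phase1, h1, h2, ih]
      · simp [pvS_phase1, pvS_dedup, h1, h2, ih]

-- seen-set dedup = filter-dedup of the not-yet-seen elements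
theorem pvS_dedup_eq_filter (l : List String) (seen : PySem.Set String) :
    pvS_dedup l seen = pvF_dedup (l.filter (fun x => !PySem.Set.contains seen (PySem.Str.lower x))) := by
  induction l generalizing seen with
  | nil => simp [pvS_dedup, pvF_dedup]
  | cons hd tl ih =>
    by_cases h1 : PySem.Str.lower hd ∈ seen
    · simp [pvS_dedup, h1, ih]
    · rw [show pvS_dedup (hd :: tl) seen =
          hd :: pvS_dedup tl (PySem.Set.add seen (PySem.Str.lower hd)) by
            simp [pvS_dedup, h1]]
      rw [List.filter_cons_of_pos (by simpa using h1)]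
      rw [pvF_dedup, ih, List.filter_filter]
      congr 2
      apply List.filter_congr
      intro x _
      by_cases hx : PySem.Str.lower x ∈ seen <;> by_cases he : PySem.Str.lower x = PySem.Str.lower hd <;>
        simp_all [PySem.Set.contains, PySem.Set.add]

theorem pvS_dedup_empty (l : List String) : pvS_dedup l PySem.Set.empty = pvF_dedup l := by
  rw [pvS_dedup_eq_filter]
  congr 1
  simp [PySem.Set.empty, PySem.Set.contains]

-- seen-set phase1 = verb_filtered of the not-yet-seen pairs
theorem pvS_phase1_eq_filter (xs : List (String × String)) (sk sv : PySem.Set String) :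
    pvS_phase1 xs sk sv = pvB_verbFiltered (xs.filter
      (fun p => !PySem.Set.contains sk (PySem.Str.lower p.2) && !PySem.Set.contains sv p.1)) := by
  induction xs generalizing sk sv with
  | nil => simp [pvS_phase1, pvB_verbFiltered]
  | cons hd tl ih =>
    obtain ⟨v, o⟩ := hd
    by_cases h1 : PySem.Str.lower o ∈ sk
    · rw [show pvS_phase1 ((v, o) :: tl) sk sv = pvS_phase1 tl sk sv by simp [pvS_phase1, h1]]
      rw [List.filter_cons_of_neg (by simp [h1])]
      exact ih sk sv
    · by_cases h2 : v ∈ sv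
      · rw [show pvS_phase1 ((v, o) :: tl) sk sv = pvS_phase1 tl sk sv by simp [pvS_phase1, h1, h2]]
        rw [List.filter_cons_of_neg (by simp [h1, h2])]
        exact ih sk sv
      · rw [show pvS_phase1 ((v, o) :: tl) sk sv =
            o :: pvS_phase1 tl (PySem.Set.add sk (PySem.Str.lower o)) (PySem.Set.add sv v) by
              simp [pvS_phase1, h1, h2]]
        rw [List.filter_cons_of_pos (by simp [h1, h2])]
        rw [pvB_verbFiltered, ih, List.filter_filter]
        congr 2
        apply List.filter_congr
        intro p _
        by_cases ha : PySem.Str.lower p.2 ∈ sk <;> by_cases hb : p.1 ∈ sv <;>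
          by_cases hc : PySem.Str.lower p.2 = PySem.Str.lower o <;> by_cases hd' : p.1 = v <;>
          simp_all [PySem.Set.contains, PySem.Set.add]

theorem pvS_phase1_empty (xs : List (String × String)) :
    pvS_phase1 xs PySem.Set.empty PySem.Set.empty = pvB_verbFiltered xs := by
  rw [pvS_phase1_eq_filter]
  congr 1
  simp [PySem.Set.empty, PySem.Set.contains]

-- counted filter-dedup is take of the unbounded one
theorem pvB_firstDistinct_eq_take (n : Nat) (l : List String) :
    pvB_firstDistinct l n = (pvF_dedup l).take n := by
  induction n generalizing l with
  | zero => cases l <;> simp [pvB_firstDistinct]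
  | succ m ih =>
    cases l with
    | nil => simp [pvB_firstDistinct, pvF_dedup]
    | cons hd tl =>
      rw [pvB_firstDistinct, pvF_dedup, List.take_succ_cons, ih]

-- B's value as the seen-set formulation
theorem alt_eq_seen (imp : List (String × String)) (str : List String) :
    choose_options_py_alt imp str =
      (pvS_dedup (pvS_phase1 imp PySem.Set.empty PySem.Set.empty ++ str ++ imp.map Prod.snd)
        PySem.Set.empty).take 3 := by
  unfold choose_options_py_alt
  rw [pvB_firstDistinct_eq_take, pvS_dedup_empty, pvS_phase1_empty]

-- ===== VERDICT (by name: the statement is the Claim_ definition above) =====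
theorem choose_options_py_spec : Claim_equal_choose_options_py := by
  intro imp str _
  unfold Spec_choose_options_py choose_options_py
  rw [alt_eq_seen]
  simp only []
  rw [pvA_loop1_eq _ _ _ _ (by simp), pvS_dedup_append, pvS_dedup_append, pvS_dedup_phase1]
  have haddapp : ∀ (a b : List String) (st : PySem.Set String),
      pvAddKeys st (a ++ b) = pvAddKeys (pvAddKeys st a) b := by
    intro a b st; simp [pvAddKeys, List.foldl_append]
  rw [haddapp]
  simp only [List.length_nil, Nat.sub_zero, List.nil_append, PySem.Set.empty]
  by_cases hc1 : 3 ≤ (pvS_phase1 imp [] []).length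
  · rw [if_pos hc1, if_pos rfl]
    dsimp only
    rw [List.take_append_of_le_length (by simp; omega), List.take_append_of_le_length hc1]
  · rw [if_neg hc1, if_neg (by simp)]
    dsimp only
    rw [pvA_loop2_eq _ _ _ (by omega)]
    dsimp only
    by_cases hc2 : 3 - (pvS_phase1 imp [] []).length ≤
        (pvS_dedup str (pvAddKeys [] (pvS_phase1 imp [] []))).length
    · rw [if_pos hc2, if_pos rfl]
      dsimp only
      rw [List.take_append, List.take_append,
        List.take_of_length_le (l := pvS_phase1 imp [] []) (by omega)]
      have h0 : 3 - ((pvS_phase1 imp [] []) ++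
          (pvS_dedup str (pvAddKeys [] (pvS_phase1 imp [] [])))).length = 0 := by simp; omega
      rw [h0, List.take_zero, List.append_nil]
    · rw [if_neg hc2, if_neg (by simp)]
      dsimp only
      rw [pvA_loop3_eq, pvA_loop2_eq _ _ _ (by simp; omega)]
      dsimp only
      by_cases hc3 : 3 - ((pvS_phase1 imp [] []) ++
          (pvS_dedup str (pvAddKeys [] (pvS_phase1 imp [] [])))).length ≤
          (pvS_dedup (List.map Prod.snd imp) (pvAddKeys (pvAddKeys [] (pvS_phase1 imp [] []))
            (pvS_dedup str (pvAddKeys [] (pvS_phase1 imp [] []))))).length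
      · rw [if_pos hc3]
        dsimp only
        rw [List.take_append,
          List.take_of_length_le (l := pvS_phase1 imp [] [] ++
            pvS_dedup str (pvAddKeys [] (pvS_phase1 imp [] []))) (by simp; omega)]
      · rw [if_neg hc3]
        dsimp only
        rw [List.take_of_length_le (by simp at hc3 ⊢; omega)]
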